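-- pv_equiv track=rewrite | github.com/LRXA2/Reminder-Agent-Public | src/app/handlers/services/gmail/light_filter.py | _matches_domain
-- ===== SOURCE A (Python) =====
-- def _matches_domain(domain: str, domains: tuple[str, ...]) -> bool:
--     current = domain.strip().lower()
--     if not current:
--         return False
--     for raw in domains:
--         item = raw.strip().lower().lstrip("@")
--         if not item:
--             continue
--         if current == item or current.endswith("." + item):
--             return True
--     return False
-- ===== SOURCE B (Python) =====
-- def _matches_domain(domain: str, domains) -> bool:
--     current = domain.strip().lower()
--     if not current:
--         return False
--     filters = {r.strip().lower().lstrip("@") for r in domains}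
--     filters.discard("")
--     candidates = [current] + [current[i + 1:] for i, c in enumerate(current) if c == "."]
--     return any(c in filters for c in candidates)
-- ===== Notes on version B (the rewrite author's own statement) =====
-- stated objective: alternative
-- what changed: Instead of scanning the filter list and testing equality/dotted-suffix per item, B builds one normalized set of filters and tests set membership for each candidate (current itself and every substring after a '.' in current).
import Mathlib
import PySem

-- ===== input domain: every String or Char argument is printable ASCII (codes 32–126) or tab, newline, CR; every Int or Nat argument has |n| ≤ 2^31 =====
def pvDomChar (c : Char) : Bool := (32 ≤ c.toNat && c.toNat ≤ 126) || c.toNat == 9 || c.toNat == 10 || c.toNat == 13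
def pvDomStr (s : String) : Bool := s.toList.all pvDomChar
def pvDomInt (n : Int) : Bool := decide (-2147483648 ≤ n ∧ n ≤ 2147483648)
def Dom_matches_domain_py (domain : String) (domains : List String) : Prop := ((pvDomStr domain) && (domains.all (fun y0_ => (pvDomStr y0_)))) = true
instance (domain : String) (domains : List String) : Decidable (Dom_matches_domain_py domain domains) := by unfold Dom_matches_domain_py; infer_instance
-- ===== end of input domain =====

-- B replaces A's per-filter suffix test by one normalized filter set plus membership tests on the
-- dot-suffixes of `current` (objective: alternative decomposition, not claimed faster).

-- ===== PORT A =====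
-- s.strip().lower()  (shared normalization step of both Pythons)
def pvCurrent (s : String) : List Char := PySem.Chars.lower (PySem.Chars.strip s.toList)
-- r.strip().lower().lstrip("@"): lstrip with the single-char set "@" is dropWhile (· == '@') — exact
def pvItem (s : String) : List Char := (pvCurrent s).dropWhile (· == '@')

def matchesLoop (current : List Char) : List String → Bool
  | [] => false
  | raw :: rest =>
    let item := pvItem raw
    if item.isEmpty then matchesLoop current rest
    else if current == item || PySem.Chars.endswith current ('.' :: item) then true
    else matchesLoop current rest

def matches_domain_py (domain : String) (domains : List String) : Bool :=
  let current := pvCurrent domain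
  if current.isEmpty then false else matchesLoop current domains

-- ===== PORT B =====
def matches_domain_py_alt (domain : String) (domains : List String) : Bool :=
  let current := pvCurrent domain
  if current.isEmpty then false
  else
    let filters := PySem.Set.discard (PySem.Set.ofList (domains.map pvItem)) []
    let candidates := current ::
      (PySem.List.enumerate current).filterMap
        (fun p => if p.2 == '.' then some (PySem.Chars.slice current (some (p.1 + 1)) none) else none)
    candidates.any (fun c => PySem.Set.contains filters c)

-- ===== PRECONDITION & SPEC =====
def Spec_matches_domain_py (domain : String) (domains : List String) (out : Bool) : Prop := out = matches_domain_py_alt domain domains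
instance (domain : String) (domains : List String) (out : Bool) : Decidable (Spec_matches_domain_py domain domains out) := by unfold Spec_matches_domain_py; infer_instance

-- ===== CLAIM (what is proved, stated in full; the proofs are below) =====
def Claim_equal_matches_domain_py : Prop := ∀ (domain : String) (domains : List String), Dom_matches_domain_py domain domains → Spec_matches_domain_py domain domains (matches_domain_py domain domains)

-- ===== LEMMAS AND PROOFS =====

lemma matchesLoop_eq_any (current : List Char) (l : List String) :
    matchesLoop current l = l.any (fun raw =>
      !(pvItem raw).isEmpty &&
        (current == pvItem raw || PySem.Chars.endswith current ('.' :: pvItem raw))) := by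
  induction l with
  | nil => rfl
  | cons raw rest ih =>
    simp only [matchesLoop, List.any_cons, ih]
    by_cases h1 : (pvItem raw).isEmpty <;>
      by_cases h2 : (current == pvItem raw || PySem.Chars.endswith current ('.' :: pvItem raw)) = true <;>
      simp [h1, h2]

-- '.'+item is a suffix of current iff item is the part after some literal '.' of current
lemma endswith_dot_iff (current item : List Char) :
    PySem.Chars.endswith current ('.' :: item) = true ↔
      ∃ k, ∃ _ : k < current.length, current[k] = '.' ∧ item = current.drop (k + 1) := by
  rw [PySem.Chars.endswith_iff]
  constructor
  · rintro ⟨pre, rfl⟩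
    refine ⟨pre.length, by simp, ?_, ?_⟩
    · simp [List.getElem_append_right]
    · rw [show pre ++ '.' :: item = (pre ++ ['.']) ++ item by simp,
        List.drop_left' (by simp : (pre ++ ['.']).length = pre.length + 1)]
  · rintro ⟨k, hk, hdot, hitem⟩
    refine ⟨current.take k, ?_⟩
    have h := List.take_append_drop k current
    rw [List.drop_eq_getElem_cons hk, hdot] at h
    rw [hitem]
    exact h

lemma key (current : List Char) (hne : current ≠ []) (domains : List String) :
    matchesLoop current domains =
      (current ::
        (PySem.List.enumerate current).filterMap
          (fun p => if p.2 == '.' then some (PySem.Chars.slice current (some (p.1 + 1)) none) else none)).any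
        (fun c => PySem.Set.contains (PySem.Set.discard (PySem.Set.ofList (domains.map pvItem)) []) c) := by
  rw [matchesLoop_eq_any, Bool.eq_iff_iff]
  simp only [List.any_eq_true, List.any_cons, Bool.or_eq_true, List.mem_filterMap,
    PySem.Set.contains_iff, PySem.Set.mem_discard, PySem.Set.mem_ofList, List.mem_map,
    Bool.and_eq_true, Bool.not_eq_eq_eq_not, Bool.not_true, List.isEmpty_eq_false_iff,
    beq_iff_eq, PySem.List.mem_enumerate_iff]
  constructor
  · rintro ⟨raw, hraw, hni, hcase⟩
    rcases hcase with hcur | hsuf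
    · exact Or.inl ⟨⟨raw, hraw, hcur.symm⟩, hne⟩
    · rcases (endswith_dot_iff current (pvItem raw)).mp hsuf with ⟨k, hk, hdot, hdrop⟩
      refine Or.inr ⟨current.drop (k + 1),
        ⟨(0 + (k : Int), current[k]), ⟨k, hk, rfl⟩, ?_⟩,
        ⟨raw, hraw, hdrop⟩, hdrop ▸ hni⟩
      show (if current[k] = '.' then
          some (PySem.Chars.slice current (some (0 + (k : Int) + 1)) none) else none) =
        some (current.drop (k + 1))
      rw [if_pos hdot, show (0 : Int) + (k : Int) + 1 = ((k + 1 : Nat) : Int) by push_cast; ring,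
        PySem.Chars.slice_eq_listSlice, PySem.List.slice_from_natCast]
  · rintro (⟨⟨raw, hraw, hcur⟩, -⟩ | ⟨x, ⟨a, ⟨k, hk, rfl⟩, hp⟩, ⟨raw, hraw, hcraw⟩, hxne⟩)
    · exact ⟨raw, hraw, by rw [hcur]; exact hne, Or.inl hcur.symm⟩
    · by_cases hdot : current[k] = '.'
      · have hcast : (0 : Int) + (k : Int) + 1 = ((k + 1 : Nat) : Int) := by push_cast; ring
        simp only [hdot, if_pos, hcast, PySem.Chars.slice_eq_listSlice,
          PySem.List.slice_from_natCast, Option.some.injEq] at hp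
        refine ⟨raw, hraw, by rw [hcraw]; exact hxne, Or.inr ?_⟩
        rw [endswith_dot_iff]
        exact ⟨k, hk, hdot, by rw [hcraw]; exact hp.symm⟩
      · simp [hdot] at hp

-- ===== VERDICT (by name: the statement is the Claim_ definition above) =====
theorem matches_domain_py_spec : Claim_equal_matches_domain_py := by
  intro domain domains _
  unfold Spec_matches_domain_py matches_domain_py matches_domain_py_alt
  by_cases hce : (pvCurrent domain).isEmpty
  · simp [hce]
  · simp only [hce, Bool.false_eq_true, if_false]
    exact key (pvCurrent domain) (by simpa [List.isEmpty_iff] using hce) domains
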